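-- pv_equiv track=rewrite | github.com/23adrian2300/ASD-AGH | Summer Exams/W6/Task 2/egzP6b.py | jump
-- ===== SOURCE A (Python) =====
-- def jump(M):
--     dict = {'UL': (-1, 2), 'RD': (2, -1), 'LU': (-2, 1), 'LD': (-2, -1), 'UR': (1, 2), 'RU': (2, 1), 'DL': (-1, -2),
--             'DR': (1, -2)}
--
--     lights = {(0, 0): True}
--     start = [0, 0]
--
--     for i in range(len(M)):
--         start[0] += dict[M[i]][0]
--         start[1] += dict[M[i]][1]
--         if (start[0], start[1]) in lights:
--             if lights[(start[0], start[1])]: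
--                 lights[(start[0], start[1])] = False
--             else:
--                 lights[(start[0], start[1])] = True
--         else:
--             lights[(start[0], start[1])] = True
--
--     count = 0
--     start = [0,0]
--
--     if (start[0], start[1]) in lights:
--         if lights[(start[0], start[1])]:
--             count += 1
--             lights[(start[0], start[1])] = False
--
--     for i in range(len(M)):
--         start[0] += dict[M[i]][0]
--         start[1] += dict[M[i]][1]
--         if (start[0], start[1]) in lights:
--             if lights[(start[0], start[1])]:
--                 count += 1
--                 lights[(start[0], start[1])] = False
--
--     return count
-- ===== SOURCE B (Python) =====
-- def jump(M):
--     moves = {'UL': (-1, 2), 'RD': (2, -1), 'LU': (-2, 1), 'LD': (-2, -1),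
--              'UR': (1, 2), 'RU': (2, 1), 'DL': (-1, -2), 'DR': (1, -2)}
--     lights = {(0, 0): True}
--     x = y = 0
--     for m in M:
--         dx, dy = moves[m]
--         x += dx
--         y += dy
--         lights[(x, y)] = not lights.get((x, y), False)
--     return sum(1 for v in lights.values() if v)
-- ===== Notes on version B (the rewrite author's own statement) =====
-- stated objective: simpler
-- what changed: B keeps the single toggle pass that builds the lights dict but replaces A's entire second re-walk of the path (with its turn-off deduplication) by directly counting the True values of the dict.
import Mathlib
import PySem

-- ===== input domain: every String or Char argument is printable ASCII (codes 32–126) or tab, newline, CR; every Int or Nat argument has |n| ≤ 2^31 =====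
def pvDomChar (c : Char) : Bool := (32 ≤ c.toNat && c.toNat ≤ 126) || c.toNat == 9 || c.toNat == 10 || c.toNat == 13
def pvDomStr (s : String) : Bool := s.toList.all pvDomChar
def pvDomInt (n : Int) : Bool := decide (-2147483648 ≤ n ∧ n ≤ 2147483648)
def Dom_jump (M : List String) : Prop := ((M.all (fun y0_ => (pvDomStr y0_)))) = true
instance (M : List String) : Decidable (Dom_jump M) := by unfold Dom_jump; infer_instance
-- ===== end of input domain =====

-- B drops A's second walk of the path and instead counts the True values of the lights dict directly (simpler; same cost).


-- shared data table: the Python dict of knight moves (direction name ↦ offset);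
-- outside Pre_ (an unknown name) Python raises KeyError, here the default (0,0) is returned
def knightMove (s : String) : Int × Int :=
  if s = "UL" then (-1, 2) else if s = "RD" then (2, -1)
  else if s = "LU" then (-2, 1) else if s = "LD" then (-2, -1)
  else if s = "UR" then (1, 2) else if s = "RU" then (2, 1)
  else if s = "DL" then (-1, -2) else if s = "DR" then (1, -2) else (0, 0)

-- ===== PORT A =====
-- A's first loop body: move, then the three-way membership/True/False branch
def jumpStep1A (st : (Int × Int) × PySem.Dict (Int × Int) Bool) (m : String) :
    (Int × Int) × PySem.Dict (Int × Int) Bool :=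
  let p := (st.1.1 + (knightMove m).1, st.1.2 + (knightMove m).2)
  if st.2.contains p then
    (if st.2.getD p false then (p, st.2.insert p false) else (p, st.2.insert p true))
  else (p, st.2.insert p true)

-- A's second loop body: move, then count-and-turn-off
def jumpStep2A (st : (Int × Int) × Int × PySem.Dict (Int × Int) Bool) (m : String) :
    (Int × Int) × Int × PySem.Dict (Int × Int) Bool :=
  let p := (st.1.1 + (knightMove m).1, st.1.2 + (knightMove m).2)
  if st.2.2.contains p then
    (if st.2.2.getD p false then (p, st.2.1 + 1, st.2.2.insert p false) else (p, st.2.1, st.2.2))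
  else (p, st.2.1, st.2.2)

def jump (M : List String) : Int :=
  let lights := (M.foldl jumpStep1A ((0, 0), (PySem.Dict.empty.insert (0, 0) true))).2
  let start0 : Int × Int := (0, 0)
  let cl :=
    if lights.contains start0 then
      (if lights.getD start0 false then ((1 : Int), lights.insert start0 false) else (0, lights))
    else (0, lights)
  (M.foldl jumpStep2A (start0, cl.1, cl.2)).2.1

-- ===== PORT B =====
-- B's loop body: move, then one unconditional toggle (lights[p] = not lights.get(p, False))
def jumpStepB (st : (Int × Int) × PySem.Dict (Int × Int) Bool) (m : String) :
    (Int × Int) × PySem.Dict (Int × Int) Bool :=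
  let p := (st.1.1 + (knightMove m).1, st.1.2 + (knightMove m).2)
  (p, st.2.insert p (! st.2.getD p false))

def jump_alt (M : List String) : Int :=
  let lights := (M.foldl jumpStepB ((0, 0), (PySem.Dict.empty.insert (0, 0) true))).2
  ((lights.values.filter (fun v => v)).length : Int)

-- ===== PRECONDITION & SPEC =====
-- Pre_ excludes exactly the inputs containing a string that is not one of the 8 move names,
-- on which Python A raises KeyError.
def Pre_jump (M : List String) : Prop :=
  ∀ s ∈ M, s = "UL" ∨ s = "RD" ∨ s = "LU" ∨ s = "LD" ∨ s = "UR" ∨ s = "RU" ∨ s = "DL" ∨ s = "DR"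
instance (M : List String) : Decidable (Pre_jump M) := by unfold Pre_jump; infer_instance
def pvWitness_jump : List String := ["UL", "RD", "RD"]

def Spec_jump (M : List String) (out : Int) : Prop := out = jump_alt M
instance (M : List String) (out : Int) : Decidable (Spec_jump M out) := by unfold Spec_jump; infer_instance

-- ===== CLAIM (what is proved, stated in full; the proofs are below) =====
def Claim_equal_jump : Prop := ∀ (M : List String), Dom_jump M → Pre_jump M → Spec_jump M (jump M)

-- ===== LEMMAS AND PROOFS =====

-- proof-side: the list of cells visited by the walk after leaving p0
def posList (p0 : Int × Int) : List String → List (Int × Int)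
  | [] => []
  | m :: M => (p0.1 + (knightMove m).1, p0.2 + (knightMove m).2) ::
      posList (p0.1 + (knightMove m).1, p0.2 + (knightMove m).2) M

-- proof-side: A's second phase as a recursion over the visited cells
def pass2 (ps : List (Int × Int)) (c : Int) (d : PySem.Dict (Int × Int) Bool) : Int :=
  match ps with
  | [] => c
  | p :: ps => if d.getD p false then pass2 ps (c + 1) (d.insert p false) else pass2 ps c d

def trueCount (d : PySem.Dict (Int × Int) Bool) : Int :=
  ((d.values.filter (fun v => v)).length : Int)

theorem contains_of_getD_true (d : PySem.Dict (Int × Int) Bool) (p : Int × Int)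
    (h : d.getD p false = true) : d.contains p = true := by
  by_contra hc
  simp only [Bool.not_eq_true] at hc
  rw [PySem.Dict.getD_of_not_contains _ false hc] at h
  exact Bool.false_ne_true h

theorem step1A_eq_stepB (st : (Int × Int) × PySem.Dict (Int × Int) Bool) (m : String) :
    jumpStep1A st m = jumpStepB st m := by
  by_cases hc : st.2.contains (st.1.1 + (knightMove m).1, st.1.2 + (knightMove m).2)
  · by_cases hg : st.2.getD (st.1.1 + (knightMove m).1, st.1.2 + (knightMove m).2) false
    · simp [jumpStep1A, jumpStepB, hc, hg]
    · simp only [Bool.not_eq_true] at hg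
      simp [jumpStep1A, jumpStepB, hc, hg]
  · simp only [Bool.not_eq_true] at hc
    simp [jumpStep1A, jumpStepB, hc, PySem.Dict.getD_of_not_contains _ false hc]

theorem builds_eq (M : List String) (st : (Int × Int) × PySem.Dict (Int × Int) Bool) :
    M.foldl jumpStep1A st = M.foldl jumpStepB st := by
  induction M generalizing st with
  | nil => rfl
  | cons m M ih => simp only [List.foldl_cons, step1A_eq_stepB, ih]

theorem fold2_eq_pass2 (M : List String) (p0 : Int × Int) (c : Int)
    (d : PySem.Dict (Int × Int) Bool) :
    (M.foldl jumpStep2A (p0, c, d)).2.1 = pass2 (posList p0 M) c d := by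
  induction M generalizing p0 c d with
  | nil => rfl
  | cons m M ih =>
    simp only [List.foldl_cons, posList, pass2]
    by_cases hg : d.getD (p0.1 + (knightMove m).1, p0.2 + (knightMove m).2) false
    · have hc := contains_of_getD_true d _ hg
      simp only [hg, if_true]
      rw [show jumpStep2A (p0, c, d) m =
          ((p0.1 + (knightMove m).1, p0.2 + (knightMove m).2), c + 1,
            d.insert (p0.1 + (knightMove m).1, p0.2 + (knightMove m).2) false) from by
        simp [jumpStep2A, hc, hg]]
      exact ih _ _ _
    · simp only [Bool.not_eq_true] at hg
      simp only [hg, Bool.false_eq_true, if_false]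
      rw [show jumpStep2A (p0, c, d) m =
          ((p0.1 + (knightMove m).1, p0.2 + (knightMove m).2), c, d) from by
        by_cases hc : d.contains (p0.1 + (knightMove m).1, p0.2 + (knightMove m).2) <;>
          simp [jumpStep2A, hc, hg]]
      exact ih _ _ _

-- a value in d.values comes from some item
theorem exists_key_of_mem_values (d : PySem.Dict (Int × Int) Bool) (v : Bool)
    (h : v ∈ d.values) : ∃ k, (k, v) ∈ d.items := by
  simp only [PySem.Dict.values, List.mem_map] at h
  obtain ⟨p, hp, hv⟩ := h
  exact ⟨p.1, by simpa [← hv] using hp⟩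

theorem trueCount_zero (d : PySem.Dict (Int × Int) Bool) (hnd : d.keys.Nodup)
    (h : ∀ k, d.getD k false = true → False) : trueCount d = 0 := by
  unfold trueCount
  have : d.values.filter (fun v => v) = [] := by
    rw [List.filter_eq_nil_iff]
    intro v hv
    obtain ⟨k, hk⟩ := exists_key_of_mem_values d v hv
    have hgd := PySem.Dict.getD_of_mem_items d hk hnd false
    cases v with
    | false => simp
    | true => exact absurd hgd (fun hh => h k hh)
  rw [this]; rfl

-- flipping one present True entry to False lowers the count of True items by one
theorem countP_flip (l : List ((Int × Int) × Bool)) (p : Int × Int)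
    (hnd : (l.map (·.1)).Nodup) (hm : (p, true) ∈ l) :
    (l.map (fun q => if q.1 == p then (p, false) else q)).countP (fun q => q.2) + 1 =
      l.countP (fun q => q.2) := by
  induction l with
  | nil => cases hm
  | cons q l ih =>
    simp only [List.map_cons, List.nodup_cons] at hnd
    by_cases hq : q.1 = p
    · -- head has key p; by nodup p is not a key of the tail
      have hpl : (p, true) ∉ l := fun h => hnd.1 (by rw [hq]; exact List.mem_map_of_mem h)
      have hqv : q = (p, true) := by
        rcases List.mem_cons.mp hm with h | h
        · exact h.symm
        · exact absurd h hpl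
      have hmap : l.map (fun q => if q.1 == p then ((p, false) : (Int × Int) × Bool) else q) = l := by
        conv_rhs => rw [← List.map_id l]
        apply List.map_congr_left
        intro r hr
        have hrp : r.1 ≠ p := fun hh => hnd.1 (by rw [hq, ← hh]; exact List.mem_map_of_mem hr)
        simp [hrp]
      subst hqv
      rw [List.map_cons, if_pos (by simp : (((p, true) : (Int × Int) × Bool).1 == p) = true),
        hmap, List.countP_cons, List.countP_cons]
      simp
    · have hm' : (p, true) ∈ l := by
        rcases List.mem_cons.mp hm with h | h
        · exact absurd (congrArg Prod.fst h.symm) hq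
        · exact h
      have h2 := ih hnd.2 hm'
      rw [List.map_cons, if_neg (by simp [hq] : ¬ ((q.1 == p) = true)),
        List.countP_cons, List.countP_cons]
      simp at h2 ⊢
      omega

theorem trueCount_insert_false (d : PySem.Dict (Int × Int) Bool) (p : Int × Int)
    (hnd : d.keys.Nodup) (h : d.getD p false = true) :
    trueCount (d.insert p false) + 1 = trueCount d := by
  have hget : d.get? p = some true := by
    cases hg : d.get? p with
    | none => simp [PySem.Dict.getD_eq_get?_getD, hg] at h
    | some v =>
      cases v with
      | true => rfl
      | false => simp [PySem.Dict.getD_eq_get?_getD, hg] at h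
  have hmem : (p, true) ∈ d.items := PySem.Dict.mem_items_of_get?_eq_some d hget
  have hc : d.contains p = true := contains_of_getD_true d p h
  have hitems := PySem.Dict.items_insert_of_contains d false hc
  unfold trueCount
  have key := countP_flip d.items p (by simpa [PySem.Dict.keys] using hnd) hmem
  simp only [PySem.Dict.values, hitems]
  rw [List.countP_eq_length_filter, List.countP_eq_length_filter] at key
  have e1 : ∀ (l : List ((Int × Int) × Bool)),
      (l.map (·.2)).filter (fun v => v) = (l.filter (fun q => q.2)).map (·.2) := by
    intro l
    rw [List.filter_map]
    rfl
  rw [e1, e1, List.length_map, List.length_map]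
  exact_mod_cast key

theorem pass2_count (ps : List (Int × Int)) (c : Int) (d : PySem.Dict (Int × Int) Bool)
    (hnd : d.keys.Nodup) (h : ∀ k, d.getD k false = true → k ∈ ps) :
    pass2 ps c d = c + trueCount d := by
  induction ps generalizing c d with
  | nil =>
    rw [pass2, trueCount_zero d hnd (fun k hk => by cases h k hk)]
    ring
  | cons p ps ih =>
    rw [pass2]
    by_cases hg : d.getD p false = true
    · simp only [hg, if_true]
      have hnd' : (d.insert p false).keys.Nodup := PySem.Dict.nodup_keys_insert d p false hnd
      have h' : ∀ k, (d.insert p false).getD k false = true → k ∈ ps := by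
        intro k hk
        by_cases hkp : k = p
        · rw [hkp, PySem.Dict.getD_insert_self] at hk; cases hk
        · rw [PySem.Dict.getD_insert_of_ne d false false hkp] at hk
          rcases List.mem_cons.mp (h k hk) with rfl | hmem
          · exact absurd rfl hkp
          · exact hmem
      rw [ih (c + 1) _ hnd' h']
      have := trueCount_insert_false d p hnd hg
      omega
    · simp only [Bool.not_eq_true] at hg
      simp only [hg, Bool.false_eq_true, if_false]
      apply ih c d hnd
      intro k hk
      rcases List.mem_cons.mp (h k hk) with rfl | hmem
      · rw [hg] at hk; cases hk
      · exact hmem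

-- keys of the built dict all lie in the seed's keys or among the visited cells
theorem build_keys_subset (M : List String) (p0 : Int × Int)
    (d : PySem.Dict (Int × Int) Bool) (k : Int × Int)
    (h : k ∈ (M.foldl jumpStepB (p0, d)).2.keys) : k ∈ d.keys ∨ k ∈ posList p0 M := by
  induction M generalizing p0 d with
  | nil => exact Or.inl h
  | cons m M ih =>
    simp only [List.foldl_cons, jumpStepB] at h
    rcases ih _ _ h with hk | hk
    · rcases (PySem.Dict.mem_keys_insert _ _ _ _).mp hk with rfl | hk'
      · exact Or.inr (by simp [posList])
      · exact Or.inl hk'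
    · exact Or.inr (by simp [posList, hk])

theorem build_keys_nodup (M : List String) (p0 : Int × Int)
    (d : PySem.Dict (Int × Int) Bool) (hnd : d.keys.Nodup) :
    (M.foldl jumpStepB (p0, d)).2.keys.Nodup := by
  induction M generalizing p0 d with
  | nil => exact hnd
  | cons m M ih =>
    simp only [List.foldl_cons, jumpStepB]
    exact ih _ _ (PySem.Dict.nodup_keys_insert _ _ _ hnd)

theorem seed_nodup : (PySem.Dict.empty.insert ((0 : Int), (0 : Int)) true).keys.Nodup := by
  decide

theorem jump_eq_pass2 (M : List String) :
    jump M = pass2 (((0, 0) : Int × Int) :: posList (0, 0) M) 0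
      (M.foldl jumpStepB ((0, 0), (PySem.Dict.empty.insert (0, 0) true))).2 := by
  unfold jump
  rw [builds_eq]
  set d := (M.foldl jumpStepB ((0, 0), (PySem.Dict.empty.insert (0, 0) true))).2 with hd
  rw [pass2]
  by_cases hg : d.getD ((0 : Int), (0 : Int)) false = true
  · have hc := contains_of_getD_true d _ hg
    simp only [hc, hg, if_true]
    exact fold2_eq_pass2 M _ _ _
  · simp only [Bool.not_eq_true] at hg
    by_cases hc : d.contains ((0 : Int), (0 : Int))
    · simp only [hc, hg, if_true, Bool.false_eq_true, if_false]
      exact fold2_eq_pass2 M _ _ _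
    · simp only [Bool.not_eq_true] at hc
      simp only [hc, hg, Bool.false_eq_true, if_false]
      exact fold2_eq_pass2 M _ _ _

-- ===== VERDICT (by name: the statement is the Claim_ definition above) =====
theorem jump_spec : Claim_equal_jump := by
  intro M _ _
  unfold Spec_jump jump_alt
  rw [jump_eq_pass2]
  set d := (M.foldl jumpStepB ((0, 0), (PySem.Dict.empty.insert (0, 0) true))).2 with hd
  have hnd : d.keys.Nodup := build_keys_nodup M _ _ seed_nodup
  have hsub : ∀ k, d.getD k false = true → k ∈ (((0, 0) : Int × Int) :: posList (0, 0) M) := by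
    intro k hk
    have hc := contains_of_getD_true d k hk
    have hkeys : k ∈ d.keys := (PySem.Dict.contains_iff_mem_keys d k).mp hc
    rcases build_keys_subset M _ _ k hkeys with hseed | hpos
    · have hk0 : k = ((0 : Int), (0 : Int)) := by
        rcases (PySem.Dict.mem_keys_insert _ _ _ _).mp hseed with rfl | hk'
        · rfl
        · simp [PySem.Dict.keys_empty] at hk'
      simp [hk0]
    · exact List.mem_cons_of_mem _ hpos
  rw [pass2_count _ 0 d hnd hsub]
  unfold trueCount
  ring
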